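-- pv_equiv track=rewrite | github.com/ShaktiDandapani/Python | Problems/Edabit/Expert/SubsConsonantVowelGroups/cons_vowels_substrings.py | get_consonant_substrings
-- ===== SOURCE A (Python) =====
-- _vowels = ["a", "e", "i", "o", "u"]
--
-- def get_consonant_substrings(o_input_word):
--
-- 	"""
--
-- 	First try with splitting the word into
-- 	an array, and later try using regex.
--
-- 	"""
-- 	unique_word_list = []
-- 	# 1. Convert input word into a list of characters
-- 	input_word = list(o_input_word) # is this necessary ?
--
--
-- 	# 2. Looping to obtain all substrings
-- 	word_found = False
-- 	for i in range(0, len(input_word)):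
-- 		u_word = []
-- 		if input_word[i] not in _vowels:
-- 			while word_found == False:
-- 				for j in range(i, len(input_word)):
-- 					u_word.append(input_word[j])
-- 					if input_word[j] not in _vowels:
-- 						# Stop
-- 						word = "".join(u_word)
-- 						unique_word_list.append(str(word))
-- 						word_found = True
-- 		word_found = False
--
-- 	# To add the character if it is in the cons list
-- 	for character in input_word:
-- 		if character not in _vowels:
-- 			unique_word_list.append(character)
--
-- 	unique_word_list = sorted(list(set(unique_word_list)))
-- 	return unique_word_list
-- ===== SOURCE B (Python) =====
-- _vowels = ["a", "e", "i", "o", "u"]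
--
-- def get_consonant_substrings(o_input_word):
--     # index consonant positions once, then enumerate consonant index pairs a <= b
--     cons = [i for i, c in enumerate(o_input_word) if c not in _vowels]
--     subs = set()
--     for a in cons:
--         for b in cons:
--             if a <= b:
--                 subs.add(o_input_word[a:b + 1])
--     return sorted(subs)
-- ===== Notes on version B (the rewrite author's own statement) =====
-- stated objective: alternative
-- what changed: B replaces A's triple-nested scan with while/word_found flag, character accumulator and a second single-consonant pass by a precomputed consonant-index list iterated pairwise with string slicing into a set.
import Mathlib
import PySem

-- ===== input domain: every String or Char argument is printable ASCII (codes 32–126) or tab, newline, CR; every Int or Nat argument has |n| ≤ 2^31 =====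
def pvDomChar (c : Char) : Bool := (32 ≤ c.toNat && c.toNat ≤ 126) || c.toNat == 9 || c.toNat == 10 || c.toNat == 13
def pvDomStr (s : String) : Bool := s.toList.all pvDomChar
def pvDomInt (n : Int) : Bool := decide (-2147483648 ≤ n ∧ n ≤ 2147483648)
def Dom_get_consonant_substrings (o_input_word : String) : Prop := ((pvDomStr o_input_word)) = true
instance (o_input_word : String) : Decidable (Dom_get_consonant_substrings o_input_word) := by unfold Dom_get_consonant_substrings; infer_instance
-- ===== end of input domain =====

-- ===== PORT A =====
-- B indexes consonant positions once and slices over index pairs instead of A's nested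
-- scans with a while-flag and a second single-consonant pass (alternative decomposition).
def pvVowels : List Char := ['a', 'e', 'i', 'o', 'u']

def get_consonant_substrings (o_input_word : String) : List String :=
  let input_word := o_input_word.toList
  let n := input_word.length
  -- for i in range(0, len): the inner `while word_found == False` executes its body exactly
  -- once whenever it is entered, because at j = i (a consonant) word_found is set to True;
  -- indices i, j are always in range, so list indexing is ported as getD (exact here).
  let unique1 := (List.range n).foldl (fun acc i =>
    if !(pvVowels.contains (input_word.getD i ' ')) then
      ((List.range' i (n - i)).foldl (fun (st : List String × List Char × Bool) j =>
        if !(pvVowels.contains (input_word.getD j ' ')) then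
          (st.1 ++ [String.ofList (st.2.1 ++ [input_word.getD j ' '])],
           st.2.1 ++ [input_word.getD j ' '], true)
        else (st.1, st.2.1 ++ [input_word.getD j ' '], st.2.2))
        (acc, ([] : List Char), false)).1
    else acc) []
  let unique2 := input_word.foldl (fun acc c =>
    if !(pvVowels.contains c) then acc ++ [String.ofList [c]] else acc) unique1
  PySem.List.sorted (PySem.Set.ofList unique2) (fun x => x) false

-- ===== PORT B =====
def get_consonant_substrings_alt (o_input_word : String) : List String :=
  let cs := o_input_word.toList
  let cons : List Int :=
    ((PySem.List.enumerate cs).filter (fun p => !(pvVowels.contains p.2))).map (·.1)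
  let subs : PySem.Set String := cons.foldl (fun s a =>
    cons.foldl (fun s b =>
      if a ≤ b then
        -- o_input_word[a:b+1] : string slice, ported via the exact list slice on code points
        PySem.Set.add s (String.ofList (PySem.List.slice cs (some a) (some (b + 1))))
      else s) s) PySem.Set.empty
  PySem.List.sorted subs (fun x => x) false

-- ===== PRECONDITION & SPEC =====
def Spec_get_consonant_substrings (o_input_word : String) (out : List String) : Prop := out = get_consonant_substrings_alt o_input_word
instance (o_input_word : String) (out : List String) : Decidable (Spec_get_consonant_substrings o_input_word out) := by unfold Spec_get_consonant_substrings; infer_instance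

-- ===== CLAIM (what is proved, stated in full; the proofs are below) =====
def Claim_equal_get_consonant_substrings : Prop := ∀ (o_input_word : String), Dom_get_consonant_substrings o_input_word → Spec_get_consonant_substrings o_input_word (get_consonant_substrings o_input_word)

-- ===== LEMMAS AND PROOFS =====

-- the consonant test and the substring cs[i..j] (inclusive) both ports produce
def pvCons (c : Char) : Bool := !(pvVowels.contains c)

def pvSub (cs : List Char) (i j : Nat) : String := String.ofList ((cs.drop i).take (j + 1 - i))

-- the inner for-j loop of A: the accumulator gains cs[i..j] for each consonant position j
theorem pvInnerA (cs : List Char) (i : Nat) (m : Nat) :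
    ∀ (j : Nat) (acc : List String) (wf : Bool), i ≤ j → j + m ≤ cs.length →
    ((List.range' j m).foldl (fun (st : List String × List Char × Bool) t =>
        if pvCons (cs.getD t ' ') then
          (st.1 ++ [String.ofList (st.2.1 ++ [cs.getD t ' '])],
           st.2.1 ++ [cs.getD t ' '], true)
        else (st.1, st.2.1 ++ [cs.getD t ' '], st.2.2))
        (acc, (cs.drop i).take (j - i), wf)).1
      = acc ++ ((List.range' j m).filter (fun t => pvCons (cs.getD t ' '))).map (pvSub cs i) := by
  induction m with
  | zero => intro j acc wf _ _; simp
  | succ m ih =>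
    intro j acc wf hij hjm
    have hj : j < cs.length := by omega
    have hji : j - i < (cs.drop i).length := by simp [List.length_drop]; omega
    have hgd : cs.getD j ' ' = cs[j] := by
      simp [List.getD, List.getElem?_eq_getElem hj]
    have hu : (cs.drop i).take (j - i) ++ [cs.getD j ' ']
        = (cs.drop i).take (j + 1 - i) := by
      have h2 : j + 1 - i = (j - i) + 1 := by omega
      rw [h2, List.take_add_one, List.getElem?_eq_getElem hji, hgd]
      have h3 : (cs.drop i)[j - i] = cs[j] := by
        rw [List.getElem_drop]
        congr 1
        omega
      simp [h3]
    rw [List.range'_succ]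
    simp only [List.foldl_cons, List.filter_cons]
    by_cases hc : pvCons (cs.getD j ' ')
    · simp only [hc, reduceIte]
      rw [hu]
      have ih' := ih (j + 1) (acc ++ [String.ofList ((cs.drop i).take (j + 1 - i))]) true
        (by omega) (by omega)
      rw [ih']
      simp [pvSub]
    · simp only [hc, Bool.false_eq_true, reduceIte]
      rw [hu]
      exact ih (j + 1) acc wf (by omega) (by omega)

-- membership in a set built by conditional adds over two nested loops
theorem pvMemFoldAdd2 {α β : Type} [BEq α] [LawfulBEq α] (l1 l2 : List β)
    (p : β → β → Prop) [DecidableRel p] (f : β → β → α) (s : PySem.Set α) (y : α) :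
    (y ∈ l1.foldl (fun s a => l2.foldl (fun s b =>
        if p a b then PySem.Set.add s (f a b) else s) s) s) ↔
      y ∈ s ∨ ∃ a ∈ l1, ∃ b ∈ l2, p a b ∧ y = f a b := by
  have hinner : ∀ (a : β) (s : PySem.Set α),
      (y ∈ l2.foldl (fun s b => if p a b then PySem.Set.add s (f a b) else s) s) ↔
        y ∈ s ∨ ∃ b ∈ l2, p a b ∧ y = f a b := by
    intro a
    induction l2 with
    | nil => simp
    | cons b l ih =>
      intro s
      simp only [List.foldl_cons]
      by_cases hp : p a b
      · rw [if_pos hp, ih, PySem.Set.mem_add]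
        simp only [List.mem_cons]
        constructor
        · rintro (⟨h | h⟩ | ⟨z, hz, hpz, hy⟩)
          · exact Or.inl h
          · exact Or.inr ⟨b, Or.inl rfl, hp, h⟩
          · exact Or.inr ⟨z, Or.inr hz, hpz, hy⟩
        · rintro (h | ⟨z, (rfl | hz), hpz, hy⟩)
          · exact Or.inl (Or.inl h)
          · exact Or.inl (Or.inr hy)
          · exact Or.inr ⟨z, hz, hpz, hy⟩
      · rw [if_neg hp, ih]
        simp only [List.mem_cons]
        constructor
        · rintro (h | ⟨z, hz, hpz, hy⟩)
          · exact Or.inl h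
          · exact Or.inr ⟨z, Or.inr hz, hpz, hy⟩
        · rintro (h | ⟨z, (rfl | hz), hpz, hy⟩)
          · exact Or.inl h
          · exact absurd hpz hp
          · exact Or.inr ⟨z, hz, hpz, hy⟩
  induction l1 generalizing s with
  | nil => simp
  | cons a l ih =>
    simp only [List.foldl_cons]
    refine Iff.trans (ih _) ?_
    rw [hinner a]
    simp only [List.mem_cons]
    constructor
    · rintro ((h | ⟨b, hb, hpb, hy⟩) | ⟨z, hz, w, hw, hpw, hy⟩)
      · exact Or.inl h
      · exact Or.inr ⟨a, Or.inl rfl, b, hb, hpb, hy⟩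
      · exact Or.inr ⟨z, Or.inr hz, w, hw, hpw, hy⟩
    · rintro (h | ⟨z, (rfl | hz), w, hw, hpw, hy⟩)
      · exact Or.inl (Or.inl h)
      · exact Or.inl (Or.inr ⟨w, hw, hpw, hy⟩)
      · exact Or.inr ⟨z, hz, w, hw, hpw, hy⟩

theorem pvNodupFoldAdd2 {α β : Type} [BEq α] [LawfulBEq α] (l1 l2 : List β)
    (p : β → β → Prop) [DecidableRel p] (f : β → β → α) (s : PySem.Set α) (hs : s.Nodup) :
    (l1.foldl (fun s a => l2.foldl (fun s b =>
        if p a b then PySem.Set.add s (f a b) else s) s) s).Nodup := by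
  have hinner : ∀ (a : β) (s : PySem.Set α), s.Nodup →
      (l2.foldl (fun s b => if p a b then PySem.Set.add s (f a b) else s) s).Nodup := by
    intro a
    induction l2 with
    | nil => intro s h; simpa
    | cons b l ih =>
      intro s h
      simp only [List.foldl_cons]
      by_cases hp : p a b
      · rw [if_pos hp]; exact ih _ (PySem.Set.nodup_add _ _ h)
      · rw [if_neg hp]; exact ih _ h
  induction l1 generalizing s with
  | nil => simpa
  | cons a l ih =>
    simp only [List.foldl_cons]
    exact ih _ (hinner a s hs)

-- membership in B's consonant index list
theorem pvMemCons (cs : List Char) (a : Int) :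
    (a ∈ ((PySem.List.enumerate cs).filter (fun p => !(pvVowels.contains p.2))).map (·.1)) ↔
      ∃ (k : Nat) (_ : k < cs.length), pvCons (cs.getD k ' ') ∧ a = (k : Int) := by
  simp only [List.mem_map, List.mem_filter, PySem.List.mem_enumerate_iff]
  constructor
  · rintro ⟨⟨ai, ac⟩, ⟨⟨k, hk, heq⟩, hc⟩, rfl⟩
    cases heq
    refine ⟨k, hk, ?_, by simp⟩
    simpa [pvCons, List.getD, List.getElem?_eq_getElem hk] using hc
  · rintro ⟨k, hk, hc, rfl⟩
    refine ⟨((k : Int), cs[k]), ⟨⟨k, hk, by simp⟩, ?_⟩, rfl⟩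
    simpa [pvCons, List.getD, List.getElem?_eq_getElem hk] using hc

-- shared characterisation: the consonant-bracketed substrings of cs
def pvHasSub (cs : List Char) (s : String) : Prop :=
  ∃ i j : Nat, i ≤ j ∧ j < cs.length ∧ pvCons (cs.getD i ' ') = true ∧
    pvCons (cs.getD j ' ') = true ∧ s = pvSub cs i j

-- characterisation of A's pre-dedup list
theorem pvMemA (cs : List Char) (s : String) :
    (s ∈ (cs.foldl (fun acc c =>
      if pvCons c then acc ++ [String.ofList [c]] else acc)
      ((List.range cs.length).foldl (fun acc i =>
        if pvCons (cs.getD i ' ') then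
          ((List.range' i (cs.length - i)).foldl (fun (st : List String × List Char × Bool) j =>
            if pvCons (cs.getD j ' ') then
              (st.1 ++ [String.ofList (st.2.1 ++ [cs.getD j ' '])],
               st.2.1 ++ [cs.getD j ' '], true)
            else (st.1, st.2.1 ++ [cs.getD j ' '], st.2.2))
            (acc, ([] : List Char), false)).1
        else acc) []))) ↔ pvHasSub cs s := by
  rw [PySem.List.foldl_append_if]
  have houter : ∀ (l : List Nat), (∀ i ∈ l, i < cs.length) → ∀ (acc0 : List String),
      (l.foldl (fun acc i =>
        if pvCons (cs.getD i ' ') then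
          ((List.range' i (cs.length - i)).foldl (fun (st : List String × List Char × Bool) j =>
            if pvCons (cs.getD j ' ') then
              (st.1 ++ [String.ofList (st.2.1 ++ [cs.getD j ' '])],
               st.2.1 ++ [cs.getD j ' '], true)
            else (st.1, st.2.1 ++ [cs.getD j ' '], st.2.2))
            (acc, ([] : List Char), false)).1
        else acc) acc0)
      = acc0 ++ l.flatMap (fun i =>
          if pvCons (cs.getD i ' ') then
            ((List.range' i (cs.length - i)).filter
              (fun t => pvCons (cs.getD t ' '))).map (pvSub cs i)
          else []) := by
    intro l hl
    induction l with
    | nil => intro acc0; simp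
    | cons i l ih =>
      intro acc0
      simp only [List.foldl_cons, List.flatMap_cons]
      have hi : i < cs.length := hl i (List.mem_cons_self)
      by_cases hc : pvCons (cs.getD i ' ') = true
      · rw [if_pos hc, if_pos hc]
        have hin := pvInnerA cs i (cs.length - i) i acc0 false (le_refl i) (by omega)
        simp only [Nat.sub_self, List.take_zero] at hin
        rw [hin, ih (fun x hx => hl x (List.mem_cons_of_mem _ hx)), List.append_assoc]
      · rw [if_neg hc, if_neg hc]
        rw [ih (fun x hx => hl x (List.mem_cons_of_mem _ hx))]
        simp
  rw [houter (List.range cs.length) (fun i hi => List.mem_range.mp hi) []]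
  simp only [List.nil_append, List.mem_append, List.mem_flatMap, List.mem_range, pvHasSub]
  constructor
  · rintro (⟨i, hi, hmem⟩ | hmem)
    · by_cases hc : pvCons (cs.getD i ' ') = true
      · rw [if_pos hc] at hmem
        simp only [List.mem_map, List.mem_filter, List.mem_range'_1] at hmem
        obtain ⟨j, ⟨⟨hj1, hj2⟩, hcj⟩, rfl⟩ := hmem
        exact ⟨i, j, hj1, by omega, hc, hcj, rfl⟩
      · rw [if_neg hc] at hmem
        exact absurd hmem (List.not_mem_nil)
    · simp only [List.mem_map, List.mem_filter] at hmem
      obtain ⟨c, ⟨hmc, hcc⟩, hs⟩ := hmem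
      obtain ⟨k, hk, rfl⟩ := List.mem_iff_getElem.mp hmc
      have hgd : cs.getD k ' ' = cs[k] := by
        simp [List.getD, List.getElem?_eq_getElem hk]
      refine ⟨k, k, le_refl k, hk, by rw [hgd]; exact hcc, by rw [hgd]; exact hcc, ?_⟩
      rw [← hs, pvSub]
      have hone : (cs.drop k).take (k + 1 - k) = [cs[k]] := by
        have h1 : k + 1 - k = 1 := by omega
        rw [h1, List.drop_eq_getElem_cons hk, List.take_succ_cons, List.take_zero]
      rw [hone]
  · rintro ⟨i, j, hij, hj, hci, hcj, rfl⟩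
    left
    refine ⟨i, by omega, ?_⟩
    rw [if_pos hci]
    simp only [List.mem_map, List.mem_filter, List.mem_range'_1]
    exact ⟨j, ⟨⟨hij, by omega⟩, hcj⟩, rfl⟩

-- characterisation of B's set
theorem pvMemB (cs : List Char) (s : String) :
    (s ∈ ((((PySem.List.enumerate cs).filter
          (fun p => !(pvVowels.contains p.2))).map (·.1)).foldl (fun st a =>
        (((PySem.List.enumerate cs).filter
          (fun p => !(pvVowels.contains p.2))).map (·.1)).foldl (fun st b =>
          if a ≤ b then
            PySem.Set.add st (String.ofList (PySem.List.slice cs (some a) (some (b + 1))))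
          else st) st) PySem.Set.empty)) ↔ pvHasSub cs s := by
  rw [pvMemFoldAdd2]
  simp only [PySem.Set.empty, List.not_mem_nil, false_or, pvMemCons, pvHasSub]
  constructor
  · rintro ⟨a, ⟨i, hi, hci, rfl⟩, b, ⟨j, hj, hcj, rfl⟩, hab, rfl⟩
    have hij : i ≤ j := by exact_mod_cast hab
    refine ⟨i, j, hij, hj, hci, hcj, ?_⟩
    have h1 : (j : Int) + 1 = ((j + 1 : Nat) : Int) := by push_cast; ring
    rw [h1, PySem.List.slice_natCast, pvSub]
  · rintro ⟨i, j, hij, hj, hci, hcj, rfl⟩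
    refine ⟨(i : Int), ⟨i, by omega, hci, rfl⟩, (j : Int), ⟨j, hj, hcj, rfl⟩,
      by exact_mod_cast hij, ?_⟩
    have h1 : (j : Int) + 1 = ((j + 1 : Nat) : Int) := by push_cast; ring
    rw [h1, PySem.List.slice_natCast, pvSub]

-- ===== VERDICT (by name: the statement is the Claim_ definition above) =====
theorem get_consonant_substrings_spec : Claim_equal_get_consonant_substrings := by
  intro o _
  unfold Spec_get_consonant_substrings get_consonant_substrings get_consonant_substrings_alt
  apply PySem.List.sorted_eq_sorted_of_perm _ _ (fun x => x) (fun a b h => h)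
  apply (List.perm_ext_iff_of_nodup (PySem.Set.nodup_ofList _)
    (pvNodupFoldAdd2 _ _ _ _ _ List.nodup_nil)).mpr
  intro s
  rw [PySem.Set.mem_ofList]
  exact (pvMemA o.toList s).trans (pvMemB o.toList s).symm
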